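-- pv_equiv track=rewrite | github.com/yitianhao/gpu_sched_new | gpu-sched-exp/gpu-tester/src/plot_nsys_report.py | compute_queue
-- ===== SOURCE A (Python) =====
-- def compute_queue(start, end):
--     start = sorted(start)
--     end = sorted(end)
--     ts = []
--     num_kernel_queued = 0
--     num_kernels_queued = []
--     i = 0
--     j = 0
--
--     while i < len(start) and j < len(end):
--         if start[i] < end[j]:
--             ts.append(start[i])
--             num_kernels_queued.append(num_kernel_queued)
--             num_kernel_queued += 1
--             i += 1
--         else:
--             ts.append(end[j])
--             num_kernel_queued -= 1
--             num_kernels_queued.append(num_kernel_queued)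
--             j += 1
--     return ts, num_kernels_queued
-- ===== SOURCE B (Python) =====
-- def compute_queue(start, end):
--     # One combined event stream: encode each end time as 2*t and each start
--     # time as 2*t+1, so plain integer sorting orders events by time with
--     # ends before starts at equal times. One linear scan then tracks the
--     # queue balance, stopping as soon as either side is exhausted.
--     events = sorted([2 * t for t in end] + [2 * t + 1 for t in start])
--     ns, ne = len(start), len(end)
--     bal = 0
--     ts = []
--     qs = []
--     for e in events:
--         if ns == 0 or ne == 0:
--             break
--         t, tag = divmod(e, 2)
--         if tag:
--             ns -= 1
--             bal += 1
--         else: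
--             ne -= 1
--             bal -= 1
--         ts.append(t)
--         qs.append(bal - tag)
--     return ts, qs
-- ===== Notes on version B (the rewrite author's own statement) =====
-- stated objective: alternative
-- what changed: Replaces A's two-pointer merge of the separately sorted start/end lists with a single combined event stream (ends encoded 2t, starts 2t+1 so one integer sort gives time order with ends first on ties) scanned once with remaining-count and balance accumulators.
import Mathlib
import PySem

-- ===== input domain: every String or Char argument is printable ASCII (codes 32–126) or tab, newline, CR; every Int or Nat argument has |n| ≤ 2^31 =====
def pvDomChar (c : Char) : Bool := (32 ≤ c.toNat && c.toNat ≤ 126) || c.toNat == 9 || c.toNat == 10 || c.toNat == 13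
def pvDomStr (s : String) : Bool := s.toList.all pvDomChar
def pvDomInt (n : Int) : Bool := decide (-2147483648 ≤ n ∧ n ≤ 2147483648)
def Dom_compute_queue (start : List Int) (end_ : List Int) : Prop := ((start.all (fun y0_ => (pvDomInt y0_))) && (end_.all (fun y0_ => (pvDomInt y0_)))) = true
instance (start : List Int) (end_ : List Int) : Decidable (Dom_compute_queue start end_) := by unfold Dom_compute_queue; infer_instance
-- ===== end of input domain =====

-- B replaces A's two-pointer merge of the separately sorted lists with one sort of a
-- combined encoded event stream followed by a single counting scan (alternative decomposition).

-- ===== PORT A =====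
-- A's while loop over the two sorted lists, state (i,j) as the remaining suffixes, counter c.
def mergeA (s e : List Int) (c : Int) (ts qs : List Int) : List Int × List Int :=
  match s, e with
  | sh :: st, eh :: et =>
    if sh < eh then mergeA st (eh :: et) (c + 1) (ts ++ [sh]) (qs ++ [c])
    else mergeA (sh :: st) et (c - 1) (ts ++ [eh]) (qs ++ [c - 1])
  | _, _ => (ts, qs)

def compute_queue (start : List Int) (end_ : List Int) : List Int × List Int :=
  mergeA (PySem.List.sorted start (fun x => x) false) (PySem.List.sorted end_ (fun x => x) false) 0 [] []

-- ===== PORT B =====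
-- Source B's for-loop over the sorted combined event list, with the break guard.
def scanB (events : List Int) (ns ne bal : Int) (ts qs : List Int) : List Int × List Int :=
  match events with
  | [] => (ts, qs)
  | e :: rest =>
    if ns = 0 ∨ ne = 0 then (ts, qs)
    else
      let t := PySem.Int.floordiv e 2
      let tag := PySem.Int.mod e 2
      if tag ≠ 0 then
        scanB rest (ns - 1) ne (bal + 1) (ts ++ [t]) (qs ++ [bal + 1 - tag])
      else
        scanB rest ns (ne - 1) (bal - 1) (ts ++ [t]) (qs ++ [bal - 1 - tag])

def compute_queue_alt (start : List Int) (end_ : List Int) : List Int × List Int :=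
  scanB (PySem.List.sorted (end_.map (fun t => 2 * t) ++ start.map (fun t => 2 * t + 1)) (fun x => x) false)
    (PySem.List.len start) (PySem.List.len end_) 0 [] []

-- ===== PRECONDITION & SPEC =====
def Spec_compute_queue (start : List Int) (end_ : List Int) (out : List Int × List Int) : Prop := out = compute_queue_alt start end_
instance (start : List Int) (end_ : List Int) (out : List Int × List Int) : Decidable (Spec_compute_queue start end_ out) := by unfold Spec_compute_queue; infer_instance

-- ===== CLAIM (what is proved, stated in full; the proofs are below) =====
def Claim_equal_compute_queue : Prop := ∀ (start : List Int) (end_ : List Int), Dom_compute_queue start end_ → Spec_compute_queue start end_ (compute_queue start end_)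

-- ===== LEMMAS AND PROOFS =====

-- The full merge of the two sorted lists, in encoded form (2t+1 for starts, 2t for ends).
def mergeE (s e : List Int) : List Int :=
  match s, e with
  | sh :: st, eh :: et =>
    if sh < eh then (2 * sh + 1) :: mergeE st (eh :: et)
    else (2 * eh) :: mergeE (sh :: st) et
  | [], es => es.map (fun t => 2 * t)
  | ss, [] => ss.map (fun t => 2 * t + 1)

-- Encoded-event arithmetic: decoding 2t+1 / 2t.
theorem fd_odd (x : Int) : PySem.Int.floordiv (2 * x + 1) 2 = x := by
  rw [PySem.Int.floordiv_eq_ediv_of_pos (by norm_num : (0:Int) < 2)]; omega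

theorem md_odd (x : Int) : PySem.Int.mod (2 * x + 1) 2 = 1 := by
  rw [PySem.Int.mod_eq_emod_of_pos (by norm_num : (0:Int) < 2)]; omega

theorem fd_even (x : Int) : PySem.Int.floordiv (2 * x) 2 = x := by
  rw [PySem.Int.floordiv_eq_ediv_of_pos (by norm_num : (0:Int) < 2)]; omega

theorem md_even (x : Int) : PySem.Int.mod (2 * x) 2 = 0 := by
  rw [PySem.Int.mod_eq_emod_of_pos (by norm_num : (0:Int) < 2)]; omega

theorem mergeE_perm (s e : List Int) :
    (mergeE s e).Perm (e.map (fun t => 2 * t) ++ s.map (fun t => 2 * t + 1)) := by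
  induction s, e using mergeE.induct with
  | case1 sh st eh et h ih =>
    rw [mergeE, if_pos h]
    exact (ih.cons _).trans List.perm_middle.symm
  | case2 sh st eh et h ih =>
    rw [mergeE, if_neg h]
    exact ih.cons _
  | case3 es => simp [mergeE]
  | case4 ss h => cases ss <;> simp_all [mergeE]

theorem mem_mergeE {x : Int} {s e : List Int} (h : x ∈ mergeE s e) :
    (∃ y ∈ s, x = 2 * y + 1) ∨ (∃ y ∈ e, x = 2 * y) := by
  have := (mergeE_perm s e).mem_iff.mp h
  rcases List.mem_append.mp this with h' | h'
  · right; obtain ⟨y, hy, rfl⟩ := List.mem_map.mp h'; exact ⟨y, hy, rfl⟩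
  · left; obtain ⟨y, hy, rfl⟩ := List.mem_map.mp h'; exact ⟨y, hy, rfl⟩

theorem mergeE_pairwise (s e : List Int)
    (hs : s.Pairwise (· ≤ ·)) (he : e.Pairwise (· ≤ ·)) :
    (mergeE s e).Pairwise (· ≤ ·) := by
  induction s, e using mergeE.induct with
  | case1 sh st eh et h ih =>
    rw [mergeE, if_pos h]
    rw [List.pairwise_cons] at hs ⊢
    refine ⟨fun x hx => ?_, ih hs.2 he⟩
    rcases mem_mergeE hx with ⟨y, hy, rfl⟩ | ⟨y, hy, rfl⟩
    · have := hs.1 y hy; omega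
    · rcases List.mem_cons.mp hy with rfl | hy'
      · omega
      · have := (List.pairwise_cons.mp he).1 y hy'; omega
  | case2 sh st eh et h ih =>
    rw [mergeE, if_neg h]
    rw [List.pairwise_cons] at he ⊢
    refine ⟨fun x hx => ?_, ih hs he.2⟩
    rcases mem_mergeE hx with ⟨y, hy, rfl⟩ | ⟨y, hy, rfl⟩
    · rcases List.mem_cons.mp hy with rfl | hy'
      · omega
      · have := (List.pairwise_cons.mp hs).1 y hy'; omega
    · have := he.1 y hy; omega
  | case3 es =>
    rw [mergeE]
    exact List.pairwise_map.mpr (he.imp (by omega))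
  | case4 ss h =>
    cases ss with
    | nil => exact absurd rfl h
    | cons a l =>
      rw [mergeE]
      · exact List.pairwise_map.mpr (hs.imp (by omega))
      · exact h

theorem sorted_combined_eq_mergeE (start end_ : List Int) :
    PySem.List.sorted (end_.map (fun t => 2 * t) ++ start.map (fun t => 2 * t + 1)) (fun x => x) false
      = mergeE (PySem.List.sorted start (fun x => x) false) (PySem.List.sorted end_ (fun x => x) false) := by
  apply PySem.List.sorted_id_eq_of_perm_of_pairwise
  · exact (mergeE_perm _ _).trans
      (List.Perm.append ((PySem.List.sorted_perm end_ _ _).map _)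
        ((PySem.List.sorted_perm start _ _).map _))
  · exact mergeE_pairwise _ _ (PySem.List.sorted_pairwise start (fun x => x))
      (PySem.List.sorted_pairwise end_ (fun x => x))

theorem scanB_break (x : Int) (rest : List Int) (ns ne bal : Int) (ts qs : List Int)
    (h : ns = 0 ∨ ne = 0) :
    scanB (x :: rest) ns ne bal ts qs = (ts, qs) := by
  rw [scanB, if_pos h]

theorem scanB_cons_odd (x : Int) (rest : List Int) (ns ne bal : Int) (ts qs : List Int)
    (hns : ns ≠ 0) (hne : ne ≠ 0) :
    scanB ((2 * x + 1) :: rest) ns ne bal ts qs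
      = scanB rest (ns - 1) ne (bal + 1) (ts ++ [x]) (qs ++ [bal]) := by
  rw [scanB, if_neg (by tauto)]
  simp only [fd_odd, md_odd]
  rw [if_pos (by norm_num), show bal + 1 - 1 = bal by ring]

theorem scanB_cons_even (x : Int) (rest : List Int) (ns ne bal : Int) (ts qs : List Int)
    (hns : ns ≠ 0) (hne : ne ≠ 0) :
    scanB ((2 * x) :: rest) ns ne bal ts qs
      = scanB rest ns (ne - 1) (bal - 1) (ts ++ [x]) (qs ++ [bal - 1]) := by
  rw [scanB, if_neg (by tauto)]
  simp only [fd_even, md_even]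
  rw [if_neg (by norm_num), show bal - 1 - 0 = bal - 1 by ring]

theorem scanB_mergeE (s e : List Int) (c : Int) (ts qs : List Int) :
    scanB (mergeE s e) (s.length : Int) (e.length : Int) c ts qs = mergeA s e c ts qs := by
  induction s, e using mergeE.induct generalizing c ts qs with
  | case1 sh st eh et h ih =>
    conv_rhs => rw [mergeA]
    rw [if_pos h, mergeE, if_pos h]
    rw [scanB_cons_odd sh (mergeE st (eh :: et)) ((sh :: st).length : Int) ((eh :: et).length : Int) c ts qs (by simp; omega) (by simp; omega)]
    rw [show (((sh :: st).length : Nat) : Int) - 1 = (st.length : Int) by push_cast [List.length_cons]; ring]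
    exact ih (c + 1) (ts ++ [sh]) (qs ++ [c])
  | case2 sh st eh et h ih =>
    conv_rhs => rw [mergeA]
    rw [if_neg h, mergeE, if_neg h]
    rw [scanB_cons_even eh (mergeE (sh :: st) et) ((sh :: st).length : Int) ((eh :: et).length : Int) c ts qs (by simp; omega) (by simp; omega)]
    rw [show (((eh :: et).length : Nat) : Int) - 1 = (et.length : Int) by push_cast [List.length_cons]; ring]
    exact ih (c - 1) (ts ++ [eh]) (qs ++ [c - 1])
  | case3 es =>
    rw [mergeE, mergeA.eq_def]
    cases es with
    | nil => rw [List.map_nil, scanB]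
    | cons a l => exact scanB_break _ _ _ _ _ _ _ (by simp)
  | case4 ss h =>
    cases ss with
    | nil => exact absurd rfl h
    | cons a l =>
      rw [mergeE, mergeA.eq_def]
      · exact scanB_break _ _ _ _ _ _ _ (by simp)
      · exact h

-- ===== VERDICT (by name: the statement is the Claim_ definition above) =====
theorem compute_queue_spec : Claim_equal_compute_queue := by
  intro start end_ _
  unfold Spec_compute_queue compute_queue compute_queue_alt
  rw [sorted_combined_eq_mergeE, PySem.List.len_eq, PySem.List.len_eq,
    ← PySem.List.length_sorted start (fun x => x) false,
    ← PySem.List.length_sorted end_ (fun x => x) false,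
    scanB_mergeE]
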